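-- pv_equiv track=rewrite | github.com/fleximeter/pctheory_pub | pctheory/util.py | norgard
-- ===== SOURCE A (Python) =====
-- def norgard(n: int):
--     """
--     Generates the first n numbers of OEIS A004718 (Per Nørgård's infinity series)
--     :param n: The number of terms to compute
--     :return: The series
--     """
--     n_list = [0 for i in range(n)]
--     i = 0
--     m = 0
--     while m < n:
--         m = 2 * i
--         if m < n:
--             n_list[m] = -n_list[i]
--         m += 1
--         if m < n:
--             n_list[m] = n_list[i] + 1
--         i += 1
--     return n_list
-- ===== SOURCE B (Python) =====
-- def norgard(n: int):
--     """Per Noergaard infinity series, term k computed from k's binary digits MSB-first."""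
--     result = []
--     for k in range(n):
--         v = 0
--         for c in bin(k)[2:]:
--             v = -v if c == '0' else v + 1
--         result.append(v)
--     return result
-- ===== Notes on version B (the rewrite author's own statement) =====
-- stated objective: alternative
-- what changed: Each term is computed independently by scanning its index's binary digits MSB-first (0 bit negates, 1 bit adds one), replacing A's pair-filling recurrence that writes positions 2i and 2i+1 of a pre-allocated array.
import Mathlib
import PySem

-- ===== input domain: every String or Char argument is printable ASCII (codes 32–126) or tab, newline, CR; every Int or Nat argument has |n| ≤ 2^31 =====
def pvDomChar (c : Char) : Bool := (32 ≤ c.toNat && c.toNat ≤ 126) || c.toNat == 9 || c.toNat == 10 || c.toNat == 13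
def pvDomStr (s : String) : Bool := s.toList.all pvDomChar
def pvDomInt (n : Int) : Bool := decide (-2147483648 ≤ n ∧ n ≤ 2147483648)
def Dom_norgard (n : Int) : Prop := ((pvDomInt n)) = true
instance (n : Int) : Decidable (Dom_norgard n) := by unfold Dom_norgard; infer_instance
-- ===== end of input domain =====

-- B computes each term independently from its index's binary digits (MSB-first scan)
-- instead of A's pair-filling recurrence over a pre-allocated array; objective: alternative.

-- ===== PORT A =====
-- the while loop of A: state is (n_list, i, m); `h` only justifies termination
def norgardLoop (n : Int) (nl : List Int) (i m : Nat) (_h : m ≤ 2 * i) : List Int :=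
  if (m : Int) < n then
    let m1 := 2 * i
    let nl1 := if (m1 : Int) < n then nl.set m1 (-(nl.getD i 0)) else nl
    let m2 := m1 + 1
    let nl2 := if (m2 : Int) < n then nl1.set m2 (nl1.getD i 0 + 1) else nl1
    norgardLoop n nl2 (i + 1) m2 (by omega)
  else nl
termination_by (n - m).toNat
decreasing_by omega

def norgard (n : Int) : List Int :=
  norgardLoop n (List.replicate n.toNat 0) 0 0 (by omega)

-- ===== PORT B =====
-- binary digits of k, most significant first (empty for 0)
def bitsMSB (k : Nat) : List Nat :=
  if k = 0 then [] else bitsMSB (k / 2) ++ [k % 2]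
termination_by k
decreasing_by omega

-- bin(k)[2:] as a digit list: Python's bin(0) is "0b0", one digit
def pyBin (k : Nat) : List Nat := if k = 0 then [0] else bitsMSB k

def norgard_alt (n : Int) : List Int :=
  (List.range n.toNat).map (fun k =>
    (pyBin k).foldl (fun v b => if b = 0 then -v else v + 1) 0)

-- ===== PRECONDITION & SPEC =====
def Spec_norgard (n : Int) (out : List Int) : Prop := out = norgard_alt n
instance (n : Int) (out : List Int) : Decidable (Spec_norgard n out) := by unfold Spec_norgard; infer_instance

-- ===== CLAIM (what is proved, stated in full; the proofs are below) =====
def Claim_equal_norgard : Prop := ∀ (n : Int), Dom_norgard n → Spec_norgard n (norgard n)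

-- ===== LEMMAS AND PROOFS =====

-- the series by its defining recurrence: a 0 = 0, a (2k) = -a k, a (2k+1) = a k + 1
def nor (k : Nat) : Int :=
  if k = 0 then 0 else if k % 2 = 0 then -nor (k / 2) else nor (k / 2) + 1
termination_by k
decreasing_by all_goals omega

lemma nor_bit0 (i : Nat) : nor (2 * i) = -nor i := by
  rcases Nat.eq_zero_or_pos i with h | h
  · subst h; simp [nor]
  · have h1 : 2 * i / 2 = i := by omega
    have h2 : 2 * i % 2 = 0 := by omega
    rw [nor, if_neg (by omega), h2, if_pos rfl, h1]

lemma nor_bit1 (i : Nat) : nor (2 * i + 1) = nor i + 1 := by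
  have h1 : (2 * i + 1) / 2 = i := by omega
  have h2 : (2 * i + 1) % 2 = 1 := by omega
  rw [nor, if_neg (by omega), h2, h1]
  simp

lemma bitsMSB_val (k : Nat) :
    (bitsMSB k).foldl (fun v b => if b = 0 then -v else v + 1) 0 = nor k := by
  induction k using Nat.strong_induction_on with
  | _ k ih =>
    by_cases h0 : k = 0
    · subst h0; simp [bitsMSB, nor]
    · rw [bitsMSB, if_neg h0, List.foldl_append, ih (k / 2) (by omega)]
      rw [show nor k = if k % 2 = 0 then -nor (k / 2) else nor (k / 2) + 1 from by
        rw [nor, if_neg h0]]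
      rcases Nat.mod_two_eq_zero_or_one k with h | h <;> simp [h]

lemma pyBin_val (k : Nat) :
    (pyBin k).foldl (fun v b => if b = 0 then -v else v + 1) 0 = nor k := by
  by_cases h0 : k = 0
  · subst h0; simp [pyBin, nor]
  · rw [pyBin, if_neg h0, bitsMSB_val]

lemma alt_eq (n : Int) : norgard_alt n = (List.range n.toNat).map nor := by
  unfold norgard_alt
  exact List.map_congr_left fun k _ => pyBin_val k

lemma getD_set_ne (l : List Int) (a : Int) (i j : Nat) (h : i ≠ j) :
    (l.set i a).getD j 0 = l.getD j 0 := by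
  simp [List.getD_eq_getElem?_getD, List.getElem?_set_ne h]

lemma getD_set_self (l : List Int) (a : Int) (i : Nat) (h : i < l.length) :
    (l.set i a).getD i 0 = a := by
  simp [List.getD_eq_getElem?_getD, h]

lemma fill_done (n : Int) (nl : List Int) (i : Nat)
    (hlen : nl.length = n.toNat)
    (hfill : ∀ j : Nat, j < n.toNat → j < 2 * i → nl.getD j 0 = nor j)
    (hcov : n.toNat ≤ 2 * i) :
    nl = (List.range n.toNat).map nor := by
  apply List.ext_getElem
  · simp [hlen]
  · intro j h1 h2
    have hj : j < n.toNat := by simpa [hlen] using h1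
    have := hfill j hj (by omega)
    rw [List.getD_eq_getElem nl 0 h1] at this
    simpa using this

lemma loop_spec (n : Int) : ∀ (fuel : Nat) (nl : List Int) (i m : Nat) (h : m ≤ 2 * i),
    (n - m).toNat ≤ fuel →
    nl.length = n.toNat →
    (∀ j : Nat, j < n.toNat → (j < 2 * i → nl.getD j 0 = nor j) ∧ (2 * i ≤ j → nl.getD j 0 = 0)) →
    ((m = 2 * i - 1 ∧ 1 ≤ i) ∨ (i = 0 ∧ m = 0)) →
    norgardLoop n nl i m h = (List.range n.toNat).map nor := by
  intro fuel
  induction fuel with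
  | zero =>
    intro nl i m h hfuel hlen hfill hm
    have hge : ¬ ((m : Int) < n) := by omega
    rw [norgardLoop, if_neg hge]
    exact fill_done n nl i hlen (fun j hj hji => (hfill j hj).1 hji) (by omega)
  | succ fuel ih =>
    intro nl i m h hfuel hlen hfill hm
    by_cases hlt : (m : Int) < n
    · rw [norgardLoop, if_pos hlt]
      set nl1 := if ((2 * i : Nat) : Int) < n then nl.set (2 * i) (-(nl.getD i 0)) else nl with hnl1
      set nl2 := if ((2 * i + 1 : Nat) : Int) < n then nl1.set (2 * i + 1) (nl1.getD i 0 + 1) else nl1 with hnl2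
      have hlen1 : nl1.length = n.toNat := by
        rw [hnl1]; split <;> simp [hlen]
      have hlen2 : nl2.length = n.toNat := by
        rw [hnl2]; split <;> simp [hlen1]
      -- value read at position i is nor i (whenever i is in range)
      have hread : i < n.toNat → nl.getD i 0 = nor i := by
        intro hin
        rcases Nat.eq_zero_or_pos i with hi0 | hip
        · subst hi0
          rw [(hfill 0 hin).2 (by omega)]
          simp [nor]
        · exact (hfill i hin).1 (by omega)
      have hread1 : i < n.toNat → nl1.getD i 0 = nor i := by
        intro hin
        rw [hnl1]
        split
        · rcases Nat.eq_zero_or_pos i with hi0 | hip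
          · subst hi0
            simp only [Nat.mul_zero]
            rw [getD_set_self _ _ _ (by omega), hread hin]
            simp [nor]
          · rw [getD_set_ne _ _ _ _ (by omega)]
            exact hread hin
        · exact hread hin
      have hfill2 : ∀ j : Nat, j < n.toNat →
          (j < 2 * (i + 1) → nl2.getD j 0 = nor j) ∧ (2 * (i + 1) ≤ j → nl2.getD j 0 = 0) := by
        intro j hj
        constructor
        · intro hlt2
          rcases Nat.lt_or_ge j (2 * i) with hcase | hcase
          · have h2 : nl2.getD j 0 = nl1.getD j 0 := by
              rw [hnl2]; split
              · exact getD_set_ne _ _ _ _ (by omega)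
              · rfl
            have h1 : nl1.getD j 0 = nl.getD j 0 := by
              rw [hnl1]; split
              · exact getD_set_ne _ _ _ _ (by omega)
              · rfl
            rw [h2, h1]
            exact (hfill j hj).1 hcase
          · have hin : i < n.toNat := by omega
            rcases Nat.eq_or_lt_of_le hcase with hj2i | hj2i1
            · -- j = 2 i
              have hje : j = 2 * i := hj2i.symm
              subst hje
              have hw : ((2 * i : Nat) : Int) < n := by omega
              have h2 : nl2.getD (2 * i) 0 = nl1.getD (2 * i) 0 := by
                rw [hnl2]; split
                · exact getD_set_ne _ _ _ _ (by omega)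
                · rfl
              have h1 : nl1.getD (2 * i) 0 = -(nl.getD i 0) := by
                rw [hnl1, if_pos hw]
                exact getD_set_self _ _ _ (by omega)
              rw [h2, h1, hread hin, nor_bit0]
            · -- j = 2 i + 1
              have hje : j = 2 * i + 1 := by omega
              subst hje
              have hw : ((2 * i + 1 : Nat) : Int) < n := by omega
              have h2 : nl2.getD (2 * i + 1) 0 = nl1.getD i 0 + 1 := by
                rw [hnl2, if_pos hw]
                exact getD_set_self _ _ _ (by omega)
              rw [h2, hread1 hin, nor_bit1]
        · intro hge2
          have h2 : nl2.getD j 0 = nl1.getD j 0 := by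
            rw [hnl2]; split
            · exact getD_set_ne _ _ _ _ (by omega)
            · rfl
          have h1 : nl1.getD j 0 = nl.getD j 0 := by
            rw [hnl1]; split
            · exact getD_set_ne _ _ _ _ (by omega)
            · rfl
          rw [h2, h1]
          exact (hfill j hj).2 (by omega)
      exact ih nl2 (i + 1) (2 * i + 1) (by omega) (by omega) hlen2 hfill2 (Or.inl ⟨by omega, by omega⟩)
    · rw [norgardLoop, if_neg hlt]
      exact fill_done n nl i hlen (fun j hj hji => (hfill j hj).1 hji) (by omega)

-- ===== VERDICT (by name: the statement is the Claim_ definition above) =====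
theorem norgard_spec : Claim_equal_norgard := by
  intro n _
  unfold Spec_norgard norgard
  rw [alt_eq]
  apply loop_spec n ((n - 0).toNat) _ 0 0 _ (by omega)
  · simp
  · intro j hj
    refine ⟨fun hlt => by omega, fun _ => ?_⟩
    have : j < (List.replicate n.toNat (0 : Int)).length := by simpa using hj
    rw [List.getD_eq_getElem _ 0 this]
    simp
  · exact Or.inr ⟨rfl, rfl⟩
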